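-- pv_equiv track=rewrite | github.com/cbib/TrialMatchAI | src/Parser/entity_recognition.py | find_and_remove_overlaps
-- ===== SOURCE A (Python) =====
-- def find_and_remove_overlaps(dictionary_list, if_overlap_keep):
--     # Create a dictionary to store non-overlapping entries
--     non_overlapping = {}
--     # Create a set of entity groups to keep
--     preferred_set = set(if_overlap_keep)
--
--     # Iterate through the input list
--     for entry in dictionary_list:
--         if 'text' in entry and 'entity_group' in entry:
--             text = entry['text']
--             group = entry['entity_group']
--
--             # Check if the text is already in the non_overlapping dictionary
--             if text in non_overlapping:
--                 # Compare groups and keep the entry if it belongs to one of the preferred groups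
--                 if group in preferred_set:
--                     non_overlapping[text] = entry
--             else:
--                 non_overlapping[text] = entry
--
--     # Convert the non-overlapping dictionary back to a list
--     result_list = list(non_overlapping.values())
--
--     return result_list
-- ===== SOURCE B (Python) =====
-- def find_and_remove_overlaps(dictionary_list, if_overlap_keep):
--     preferred = set(if_overlap_keep)
--     # Pass 1: group the valid entries by text, preserving first-occurrence order.
--     groups = {}
--     for entry in dictionary_list:
--         if 'text' in entry and 'entity_group' in entry:
--             groups.setdefault(entry['text'], []).append(entry)
--     # Pass 2: per text, pick the last later entry whose group is preferred,
--     # otherwise the first-seen entry.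
--     result = []
--     for g in groups.values():
--         chosen = next((e for e in reversed(g[1:]) if e['entity_group'] in preferred), g[0])
--         result.append(chosen)
--     return result
-- ===== Notes on version B (the rewrite author's own statement) =====
-- stated objective: alternative
-- what changed: Replaces A's incremental overwrite-on-preferred dict loop with a two-pass structure: first group the valid entries by text in first-occurrence order, then per group select the last later entry with a preferred entity_group (falling back to the group's first entry).
import Mathlib
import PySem

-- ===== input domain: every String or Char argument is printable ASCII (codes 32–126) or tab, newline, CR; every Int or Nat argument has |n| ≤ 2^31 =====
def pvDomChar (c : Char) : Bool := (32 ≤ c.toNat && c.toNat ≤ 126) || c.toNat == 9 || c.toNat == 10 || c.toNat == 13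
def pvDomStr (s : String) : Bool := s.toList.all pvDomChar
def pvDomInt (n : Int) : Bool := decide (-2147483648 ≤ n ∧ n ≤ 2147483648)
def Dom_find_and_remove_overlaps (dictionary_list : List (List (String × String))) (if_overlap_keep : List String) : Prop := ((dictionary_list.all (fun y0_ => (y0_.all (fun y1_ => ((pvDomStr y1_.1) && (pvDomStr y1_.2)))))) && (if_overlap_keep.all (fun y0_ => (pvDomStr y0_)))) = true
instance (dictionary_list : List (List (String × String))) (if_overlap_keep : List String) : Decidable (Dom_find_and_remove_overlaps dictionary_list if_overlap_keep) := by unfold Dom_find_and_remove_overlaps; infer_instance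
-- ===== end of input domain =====

-- B replaces A's overwrite-on-preferred dict loop by a group-by-text pass followed by a
-- per-group selection pass (alternative decomposition, same cost).

-- ===== PORT A =====
-- one loop step of A: entries are Python dicts = assoc lists; 'text' in entry / entry['text'] via Dict.mk/get?
def aStep (preferred : List String) (d : PySem.Dict String (List (String × String))) (entry : List (String × String)) : PySem.Dict String (List (String × String)) :=
  match (PySem.Dict.mk entry).get? "text", (PySem.Dict.mk entry).get? "entity_group" with
  | some text, some group =>
      if d.contains text then
        if preferred.contains group then d.insert text entry else d
      else d.insert text entry
  | _, _ => d

def find_and_remove_overlaps (dictionary_list : List (List (String × String))) (if_overlap_keep : List String) : List (List (String × String)) :=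
  let preferred := PySem.Set.ofList if_overlap_keep
  let non_overlapping := dictionary_list.foldl (aStep preferred) PySem.Dict.empty
  non_overlapping.values

-- ===== PORT B =====
-- e['entity_group']; the "" default is never used where selectEntry is applied (all grouped entries carry the key)
def entGroup (e : List (String × String)) : String := (PySem.Dict.mk e).getD "entity_group" ""

-- one grouping step of B: groups.setdefault(entry['text'], []).append(entry)
def bStep (m : PySem.Dict String (List (List (String × String)))) (entry : List (String × String)) : PySem.Dict String (List (List (String × String))) :=
  match (PySem.Dict.mk entry).get? "text", (PySem.Dict.mk entry).get? "entity_group" with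
  | some text, some _ => m.modify text [] (· ++ [entry])
  | _, _ => m

-- next((e for e in reversed(g[1:]) if e['entity_group'] in preferred), g[0])
def selectEntry (preferred : List String) (g : List (List (String × String))) : List (String × String) :=
  match (g.drop 1).reverse.find? (fun e => preferred.contains (entGroup e)) with
  | some e => e
  | none => g.headD []

def find_and_remove_overlaps_alt (dictionary_list : List (List (String × String))) (if_overlap_keep : List String) : List (List (String × String)) :=
  let preferred := PySem.Set.ofList if_overlap_keep
  let groups := dictionary_list.foldl bStep PySem.Dict.empty
  groups.values.map (selectEntry preferred)

-- ===== PRECONDITION & SPEC =====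
def Spec_find_and_remove_overlaps (dictionary_list : List (List (String × String))) (if_overlap_keep : List String) (out : List (List (String × String))) : Prop := out = find_and_remove_overlaps_alt dictionary_list if_overlap_keep
instance (dictionary_list : List (List (String × String))) (if_overlap_keep : List String) (out : List (List (String × String))) : Decidable (Spec_find_and_remove_overlaps dictionary_list if_overlap_keep out) := by unfold Spec_find_and_remove_overlaps; infer_instance

-- ===== CLAIM (what is proved, stated in full; the proofs are below) =====
def Claim_equal_find_and_remove_overlaps : Prop := ∀ (dictionary_list : List (List (String × String))) (if_overlap_keep : List String), Dom_find_and_remove_overlaps dictionary_list if_overlap_keep → Spec_find_and_remove_overlaps dictionary_list if_overlap_keep (find_and_remove_overlaps dictionary_list if_overlap_keep)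

-- ===== LEMMAS AND PROOFS =====

-- appending an entry to a nonempty group selects it iff its group is preferred
theorem selectEntry_append (preferred : List String) (g : List (List (String × String))) (e : List (String × String)) (hg : g ≠ []) :
    selectEntry preferred (g ++ [e]) =
      if preferred.contains (entGroup e) then e else selectEntry preferred g := by
  cases g with
  | nil => exact absurd rfl hg
  | cons a gs =>
    by_cases hp : entGroup e ∈ preferred
    · simp [selectEntry, hp]
    · simp only [selectEntry, List.cons_append, List.drop_succ_cons, List.drop_zero,
        List.reverse_append, List.reverse_cons, List.reverse_nil, List.nil_append, List.find?,
        List.contains_eq_mem, hp, decide_false]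
      cases (gs.reverse.find? (fun e => decide (entGroup e ∈ preferred))) <;> simp

-- A's dict (= B's groups mapped through selectEntry) has the same keys as B's groups
theorem contains_mapped (preferred : List String) (m : PySem.Dict String (List (List (String × String)))) (t : String) :
    (PySem.Dict.mk (m.items.map (fun p => (p.1, selectEntry preferred p.2)))).contains t = m.contains t := by
  simp [PySem.Dict.contains, List.any_map, Function.comp_def]

-- one loop step preserves the simulation: A's dict stays the selectEntry-image of B's groups
theorem step_eq (preferred : List String) (m : PySem.Dict String (List (List (String × String))))
    (hnd : m.keys.Nodup) (hne : ∀ p ∈ m.items, p.2 ≠ []) (e : List (String × String)) :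
    aStep preferred ⟨m.items.map (fun p => (p.1, selectEntry preferred p.2))⟩ e
      = ⟨(bStep m e).items.map (fun p => (p.1, selectEntry preferred p.2))⟩ := by
  unfold aStep bStep
  cases hT : (PySem.Dict.mk e).get? "text" with
  | none => cases (PySem.Dict.mk e).get? "entity_group" <;> rfl
  | some t =>
  cases hG : (PySem.Dict.mk e).get? "entity_group" with
  | none => rfl
  | some g =>
  simp only []
  have hg : entGroup e = g := PySem.Dict.getD_of_get?_eq_some _ "" hG
  have hc := contains_mapped preferred m t
  by_cases hmc : m.contains t = true
  · rw [show (m.modify t [] (· ++ [e])) = m.insert t (m.getD t [] ++ [e]) from rfl]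
    have huniq : ∀ p ∈ m.items, p.1 = t → p.2 = m.getD t [] := by
      intro p hp hpt
      have := PySem.Dict.getD_of_mem_items (d := m) (k := p.1) (v := p.2) (by simpa using hp) hnd
        ([] : List (List (String × String)))
      rw [hpt] at this; exact this.symm
    by_cases hp : preferred.contains g = true
    · simp only [hc, hmc, hp, if_true]
      apply PySem.Dict.ext
      rw [PySem.Dict.items_insert_of_contains _ _ (by rw [hc]; exact hmc),
          PySem.Dict.items_insert_of_contains _ _ hmc]
      simp only [List.map_map]
      apply List.map_congr_left
      intro p hpm
      by_cases hpt : p.1 = t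
      · have h2 := huniq p hpm hpt
        simp only [Function.comp_def, hpt, beq_self_eq_true, if_true]
        rw [selectEntry_append preferred (m.getD t []) e (h2 ▸ hne p hpm), hg]
        simp [show g ∈ preferred from by simpa using hp]
      · simp [hpt]
    · simp only [hc, hmc, hp, if_true]
      apply PySem.Dict.ext
      rw [PySem.Dict.items_insert_of_contains _ _ hmc]
      simp only [List.map_map]
      apply List.map_congr_left
      intro p hpm
      by_cases hpt : p.1 = t
      · have h2 := huniq p hpm hpt
        have hne' : p.2 ≠ [] := hne p hpm
        simp only [Function.comp_def, hpt, beq_self_eq_true, if_true]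
        rw [← h2, selectEntry_append preferred p.2 e hne', hg]
        simp [show g ∉ preferred from by simpa using hp]
      · simp [hpt]
  · have hmc' : m.contains t = false := by simpa using hmc
    have hc' : (⟨List.map (fun p => (p.1, selectEntry preferred p.2)) m.items⟩ : PySem.Dict String (List (String × String))).contains t = false := by rw [hc, hmc']
    rw [show (m.modify t [] (· ++ [e])) = m.insert t (m.getD t [] ++ [e]) from rfl,
        PySem.Dict.getD_of_not_contains _ _ hmc', if_neg (by rw [hc']; simp)]
    apply PySem.Dict.ext
    rw [PySem.Dict.items_insert_of_not_contains _ _ hc',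
        PySem.Dict.items_insert_of_not_contains _ _ hmc']
    simp [selectEntry]

theorem bStep_nodup (m : PySem.Dict String (List (List (String × String)))) (e : List (String × String))
    (hnd : m.keys.Nodup) : (bStep m e).keys.Nodup := by
  unfold bStep
  cases (PySem.Dict.mk e).get? "text" with
  | none => cases (PySem.Dict.mk e).get? "entity_group" <;> exact hnd
  | some t =>
    cases (PySem.Dict.mk e).get? "entity_group" with
    | none => exact hnd
    | some g => exact PySem.Dict.nodup_keys_insert _ _ _ hnd

theorem bStep_ne (m : PySem.Dict String (List (List (String × String)))) (e : List (String × String))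
    (hne : ∀ p ∈ m.items, p.2 ≠ []) : ∀ p ∈ (bStep m e).items, p.2 ≠ [] := by
  unfold bStep
  cases (PySem.Dict.mk e).get? "text" with
  | none => cases (PySem.Dict.mk e).get? "entity_group" <;> exact hne
  | some t =>
    cases (PySem.Dict.mk e).get? "entity_group" with
    | none => exact hne
    | some g =>
      intro p hp
      rcases (PySem.Dict.mem_items_insert _ _ _ _).mp hp with h | ⟨h, _⟩
      · rw [h]; simp
      · exact hne p h

-- loop invariant: A's dict is B's groups with selectEntry applied to each value
theorem fold_items (preferred : List String) (l : List (List (String × String)))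
    (m : PySem.Dict String (List (List (String × String))))
    (hnd : m.keys.Nodup) (hne : ∀ p ∈ m.items, p.2 ≠ []) :
    (l.foldl (aStep preferred) ⟨m.items.map (fun p => (p.1, selectEntry preferred p.2))⟩).items
      = (l.foldl bStep m).items.map (fun p => (p.1, selectEntry preferred p.2)) := by
  induction l generalizing m with
  | nil => rfl
  | cons e l ih =>
    simp only [List.foldl_cons, step_eq preferred m hnd hne e]
    exact ih (bStep m e) (bStep_nodup m e hnd) (bStep_ne m e hne)

-- ===== VERDICT (by name: the statement is the Claim_ definition above) =====
theorem find_and_remove_overlaps_spec : Claim_equal_find_and_remove_overlaps := by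
  intro dl keep _
  unfold Spec_find_and_remove_overlaps find_and_remove_overlaps find_and_remove_overlaps_alt
  have h := fold_items (PySem.Set.ofList keep) dl PySem.Dict.empty
    (by simp [PySem.Dict.keys, PySem.Dict.empty]) (by simp [PySem.Dict.empty])
  simp only [PySem.Dict.empty, List.map_nil] at h
  simp only [PySem.Dict.values, PySem.Dict.empty, h, List.map_map]
  rfl
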